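-- pv_equiv track=rewrite | github.com/MassimoLauria/adventofcode | 2019/code10.py | sights
-- ===== SOURCE A (Python) =====
-- def gcd(a,b):
--     a,b=abs(a),abs(b)
--     a,b = min(a,b),max(a,b)
--     while b>0:
--         a , b = b, a % b
--     return a
--
-- def orientedslope(x0,y0,x1,y1):
--     """
--     The oriented slope between points (x0,y0) and (x1,y1) is
--
--     dx,dy
--
--     where
--
--     dx=(x1-x0), dy=(y1-y0)
--
--     normalized so that dx,dy are coprimes
--     """
--     dx=x1-x0
--     dy=y1-y0
--     d = gcd(dx,dy)
--     return (dx//d,dy//d)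
--
-- def sights(observer, points):
--     rays={}
--     for p in points:
--         if p==observer:
--             continue
--         r=orientedslope(*observer,*p)
--         rays.setdefault(r,set())
--         rays[r].add(p)
--
--     return rays
-- ===== SOURCE B (Python) =====
-- def _gcd(a, b):
--     return _gcd(b, a % b) if b > 0 else a
--
-- def _slope(observer, p):
--     dx = p[0] - observer[0]
--     dy = p[1] - observer[1]
--     g = _gcd(abs(dx), abs(dy))
--     return (dx // g, dy // g)
--
-- def sights(observer, points):
--     ps = [p for p in points if p != observer]
--     ks = dict.fromkeys(_slope(observer, p) for p in ps)
--     return {k: {p for p in ps if _slope(observer, p) == k} for k in ks}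
-- ===== Notes on version B (the rewrite author's own statement) =====
-- stated objective: alternative
-- what changed: B replaces A's single-pass dict-of-sets scatter (setdefault + in-place set.add) with a declarative two-pass pipeline: filter out the observer, dedup the slope keys in first-occurrence order, then build each group as a set comprehension filtering the points by key.
import Mathlib
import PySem

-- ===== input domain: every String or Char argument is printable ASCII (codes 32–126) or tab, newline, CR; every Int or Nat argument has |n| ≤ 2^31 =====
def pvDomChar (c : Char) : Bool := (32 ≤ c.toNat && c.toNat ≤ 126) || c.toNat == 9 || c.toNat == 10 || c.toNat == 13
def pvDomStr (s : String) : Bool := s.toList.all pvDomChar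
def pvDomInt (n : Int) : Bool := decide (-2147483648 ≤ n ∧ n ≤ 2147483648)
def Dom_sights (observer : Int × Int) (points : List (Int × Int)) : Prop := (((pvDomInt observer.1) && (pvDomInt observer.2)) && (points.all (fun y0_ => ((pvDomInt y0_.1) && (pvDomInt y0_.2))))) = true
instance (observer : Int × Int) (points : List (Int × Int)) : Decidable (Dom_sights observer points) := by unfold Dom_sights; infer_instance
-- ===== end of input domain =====

-- B is an alternative decomposition (filter, dedup keys, per-key filter comprehensions)
-- of A's one-pass dict-of-sets scatter; same return value, not claimed faster.

-- ===== PORT A =====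
-- while b>0: a, b = b, a % b   (Python % with positive divisor)
def pvGcdLoopA (a b : Int) : Int :=
  if b > 0 then pvGcdLoopA b (PySem.Int.mod a b) else a
termination_by b.toNat
decreasing_by
  have h1 : 0 ≤ PySem.Int.mod a b := PySem.Int.mod_nonneg a (by omega)
  have h2 : PySem.Int.mod a b < b := PySem.Int.mod_lt a (by omega)
  omega


def pvGcdA (a b : Int) : Int :=
  let a1 := |a|
  let b1 := |b|
  pvGcdLoopA (min a1 b1) (max a1 b1)

def pvOrientedslopeA (x0 y0 x1 y1 : Int) : Int × Int :=
  let dx := x1 - x0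
  let dy := y1 - y0
  let d := pvGcdA dx dy
  (PySem.Int.floordiv dx d, PySem.Int.floordiv dy d)

def sights (observer : Int × Int) (points : List (Int × Int)) : List (Int × Int × List (Int × Int)) :=
  (points.foldl (fun rays p =>
      if p = observer then rays
      else
        let r := pvOrientedslopeA observer.1 observer.2 p.1 p.2
        let rays := rays.setdefault r PySem.Set.empty
        rays.insert r (PySem.Set.add (rays.getD r PySem.Set.empty) p))
    PySem.Dict.empty).items.map (fun kv => (kv.1.1, kv.1.2, kv.2))

-- ===== PORT B =====
def pvGcdB (a b : Int) : Int :=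
  if b > 0 then pvGcdB b (PySem.Int.mod a b) else a
termination_by b.toNat
decreasing_by
  have h1 : 0 ≤ PySem.Int.mod a b := PySem.Int.mod_nonneg a (by omega)
  have h2 : PySem.Int.mod a b < b := PySem.Int.mod_lt a (by omega)
  omega


def pvSlopeB (observer : Int × Int) (p : Int × Int) : Int × Int :=
  let dx := p.1 - observer.1
  let dy := p.2 - observer.2
  let g := pvGcdB |dx| |dy|
  (PySem.Int.floordiv dx g, PySem.Int.floordiv dy g)

def sights_alt (observer : Int × Int) (points : List (Int × Int)) : List (Int × Int × List (Int × Int)) :=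
  let ps := points.filter (fun p => decide (p ≠ observer))
  let ks := PySem.List.dedup (ps.map (fun p => pvSlopeB observer p))
  ks.map (fun k => (k.1, k.2, PySem.Set.ofList (ps.filter (fun p => decide (pvSlopeB observer p = k)))))

-- ===== PRECONDITION & SPEC =====
def Spec_sights (observer : Int × Int) (points : List (Int × Int)) (out : List (Int × Int × List (Int × Int))) : Prop := out = sights_alt observer points
instance (observer : Int × Int) (points : List (Int × Int)) (out : List (Int × Int × List (Int × Int))) : Decidable (Spec_sights observer points out) := by unfold Spec_sights; infer_instance

-- ===== CLAIM (what is proved, stated in full; the proofs are below) =====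
def Claim_equal_sights : Prop := ∀ (observer : Int × Int) (points : List (Int × Int)), Dom_sights observer points → Spec_sights observer points (sights observer points)

-- ===== LEMMAS AND PROOFS =====

lemma pvGcdLoopA_eq_pvGcdB (a b : Int) : pvGcdLoopA a b = pvGcdB a b := by
  induction a, b using pvGcdLoopA.induct with
  | case1 a b hb ih => rw [pvGcdLoopA, pvGcdB, if_pos hb, if_pos hb]; exact ih
  | case2 a b hb => rw [pvGcdLoopA, pvGcdB, if_neg hb, if_neg hb]

lemma pvGcdB_small (a b : Int) (h0 : 0 ≤ b) (h : b < a) : pvGcdB b a = pvGcdB a b := by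
  have ha : 0 < a := by omega
  have hmod : PySem.Int.mod b a = b := by
    rw [PySem.Int.mod_eq_emod_of_pos ha]
    exact Int.emod_eq_of_lt h0 h
  conv_lhs => rw [pvGcdB]
  rw [if_pos ha, hmod]

lemma pvGcdB_minmax (a b : Int) (_ha : 0 ≤ a) (hb : 0 ≤ b) :
    pvGcdB (min a b) (max a b) = pvGcdB a b := by
  rcases le_or_gt a b with h | h
  · rw [min_eq_left h, max_eq_right h]
  · rw [min_eq_right h.le, max_eq_left h.le]
    exact pvGcdB_small a b hb h

@[simp] lemma slopeA_eq_slopeB (o p : Int × Int) :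
    pvOrientedslopeA o.1 o.2 p.1 p.2 = pvSlopeB o p := by
  unfold pvOrientedslopeA pvSlopeB pvGcdA
  simp only []
  rw [pvGcdLoopA_eq_pvGcdB, pvGcdB_minmax _ _ (abs_nonneg _) (abs_nonneg _)]

-- skipping the observer in the loop = folding over the filtered list
lemma foldl_skip {α β : Type} [DecidableEq β] (g : α → β → α) (obs : β) :
    ∀ (l : List β) (a0 : α),
      l.foldl (fun acc p => if p = obs then acc else g acc p) a0
        = (l.filter (fun p => decide (p ≠ obs))).foldl g a0 := by
  intro l
  induction l with
  | nil => intro a0; rfl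
  | cons x xs ih =>
      intro a0
      by_cases hx : x = obs <;> simp [hx, List.foldl_cons, ih]

-- A's setdefault-then-insert step is a single insert
lemma stepA_eq_insert (d : PySem.Dict (Int × Int) (PySem.Set (Int × Int))) (r : Int × Int)
    (p : Int × Int) :
    (let d1 := d.setdefault r PySem.Set.empty
     d1.insert r (PySem.Set.add (d1.getD r PySem.Set.empty) p))
      = d.insert r (PySem.Set.add (d.getD r PySem.Set.empty) p) := by
  by_cases hc : d.contains r
  · rw [PySem.Dict.setdefault_of_contains d PySem.Set.empty hc]
  · have hc' : d.contains r = false := by simp [hc]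
    rw [PySem.Dict.setdefault_of_not_contains d PySem.Set.empty hc']
    simp only [PySem.Dict.getD_insert_self, PySem.Dict.insert_insert_self,
      PySem.Dict.getD_of_not_contains d PySem.Set.empty hc']

-- value of the grouping fold at any key
lemma getD_fold (obs : Int × Int) :
    ∀ (l : List (Int × Int)) (d : PySem.Dict (Int × Int) (PySem.Set (Int × Int))) (k : Int × Int),
      (l.foldl (fun d p =>
          d.insert (pvSlopeB obs p) (PySem.Set.add (d.getD (pvSlopeB obs p) PySem.Set.empty) p)) d).getD
            k PySem.Set.empty
        = PySem.Set.update (d.getD k PySem.Set.empty)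
            (l.filter (fun p => decide (pvSlopeB obs p = k))) := by
  intro l
  induction l with
  | nil => intro d k; simp [PySem.Set.update]
  | cons x xs ih =>
      intro d k
      by_cases hk : pvSlopeB obs x = k
      · simp only [List.foldl_cons, ih, List.filter_cons, hk, decide_true,
          PySem.Dict.getD_insert]
        simp
      · simp only [List.foldl_cons, ih, List.filter_cons, hk, decide_false,
          PySem.Dict.getD_insert]
        rw [if_neg (by exact fun h => hk h.symm)]
        simp

theorem sights_eq_alt (observer : Int × Int) (points : List (Int × Int)) :
    sights observer points = sights_alt observer points := by
  unfold sights sights_alt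
  simp only [slopeA_eq_slopeB, stepA_eq_insert]
  rw [foldl_skip]
  set ps := points.filter (fun p => decide (p ≠ observer)) with hps
  set F := fun (d : PySem.Dict (Int × Int) (PySem.Set (Int × Int))) (p : Int × Int) =>
    d.insert (pvSlopeB observer p) (PySem.Set.add (d.getD (pvSlopeB observer p) PySem.Set.empty) p)
    with hF
  set R := ps.foldl F PySem.Dict.empty with hR
  have hnodup : R.keys.Nodup := by
    rw [hR, hF]
    exact PySem.Dict.nodup_keys_foldl_insert_key ps (fun p => pvSlopeB observer p) _ _
      PySem.Dict.nodup_keys_empty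
  have hkeys : R.keys = PySem.Set.ofList (ps.map (fun p => pvSlopeB observer p)) := by
    rw [hR, hF, PySem.Dict.keys_foldl_insert_key, PySem.Dict.keys_empty,
      PySem.Set.update_nil_left]
  have hitems := PySem.Dict.items_eq_map_keys R hnodup PySem.Set.empty
  rw [hitems, hkeys, List.map_map, PySem.List.dedup_eq_ofList]
  apply List.map_congr_left
  intro k hk
  have hv : R.getD k PySem.Set.empty
      = PySem.Set.ofList (ps.filter (fun p => decide (pvSlopeB observer p = k))) := by
    rw [hR, hF, getD_fold, PySem.Dict.getD_empty, PySem.Set.update_empty]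
  simp only [Function.comp_apply, hv]

-- ===== VERDICT (by name: the statement is the Claim_ definition above) =====
theorem sights_spec : Claim_equal_sights := by
  intro observer points _
  unfold Spec_sights
  exact sights_eq_alt observer points
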